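-- pv_equiv track=rewrite | github.com/xandeq/extratordedados | algoritmo_super_inteligente.py | extrair_nome
-- ===== SOURCE A (Python) =====
-- NOMES=['alexandre','cristina','fernanda','fernando','julia','lucas','luiz','luis','marcelo','maria','paulo','pedro','rafael','sergio','vitor','ana','andre','bruno','daniel','diego','eduardo','fabio','felipe','livia','marly']
--
-- SOBRENOMES=['silva','santos','oliveira','ferreira','alves','costa','gomes','lopes','soares','dias','moreira','campos','miranda','farias','sales','coelho','ramos','milanez','lagemann','favero']
--
-- PALAVRAS={'contabilidade':'Contabilidade','advocacia':'Advocacia','advogados':'Advogados','consultoria':'Consultoria','clinica':'Clínica','academia':'Academia','cabana':'Cabana','imovel':'Imóvel','imobiliaria':'Imobiliária'}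
--
-- GENERICOS=['contato','atendimento','info','comercial','suporte']
--
-- DOMINIOS_PESSOAIS=['gmail.com','hotmail.com','outlook.com']
--
-- def extrair_nome(email):
--     if not email or '@' not in email:return "Lead sem nome"
--     prefixo,dominio=email.split('@',1)
--     dominio_limpo=dominio.replace('.com.br','').replace('.com','').replace('.adv.br','')
--
--     # Se prefixo genérico, usar domínio
--     if prefixo.lower() in GENERICOS:
--         base=dominio_limpo
--     elif any(d in dominio.lower() for d in DOMINIOS_PESSOAIS):
--         base=prefixo
--     else:
--         base=dominio_limpo
--
--     base=base.lower().strip()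
--     resultado=[]
--     pos=0
--
--     # Passar 1: Identificar palavras conhecidas
--     while pos<len(base):
--         match_found=False
--         # Tentar palavras de negócio (mais longas primeiro)
--         for pal,cap in sorted(PALAVRAS.items(),key=lambda x:len(x[0]),reverse=True):
--             if base[pos:pos+len(pal)]==pal:
--                 resultado.append(cap)
--                 pos+=len(pal)
--                 match_found=True
--                 break
--         if match_found:continue
--
--         # Tentar nomes próprios
--         for nome in sorted(NOMES+SOBRENOMES,key=len,reverse=True):
--             if base[pos:pos+len(nome)]==nome:
--                 resultado.append(nome.capitalize())
--                 pos+=len(nome)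
--                 match_found=True
--                 break
--
--         if not match_found:
--             # Coletar até próxima palavra conhecida ou fim
--             chunk=''
--             while pos<len(base):
--                 chunk+=base[pos]
--                 pos+=1
--                 # Checar se próximo pedaço é palavra conhecida
--                 achou=False
--                 for pal in list(PALAVRAS.keys())+NOMES+SOBRENOMES:
--                     if base[pos:pos+len(pal)]==pal:
--                         achou=True
--                         break
--                 if achou:break
--             if chunk:resultado.append(chunk.capitalize())
--
--     return ' '.join(resultado) if resultado else base.capitalize()
-- ===== SOURCE B (Python) =====
-- # B: staged re-implementation — phase 1 produces the list of matched intervals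
-- # (start, end, token) using a first-character index of the known words, phase 2
-- # rebuilds the output by slicing the gaps between intervals; A instead interleaves
-- # matching with a nested lookahead chunk-collection loop and re-sorts the word
-- # tables on every iteration.
--
-- NOMES=['alexandre','cristina','fernanda','fernando','julia','lucas','luiz','luis','marcelo','maria','paulo','pedro','rafael','sergio','vitor','ana','andre','bruno','daniel','diego','eduardo','fabio','felipe','livia','marly']
--
-- SOBRENOMES=['silva','santos','oliveira','ferreira','alves','costa','gomes','lopes','soares','dias','moreira','campos','miranda','farias','sales','coelho','ramos','milanez','lagemann','favero']
--
-- PALAVRAS={'contabilidade':'Contabilidade','advocacia':'Advocacia','advogados':'Advogados','consultoria':'Consultoria','clinica':'Clínica','academia':'Academia','cabana':'Cabana','imovel':'Imóvel','imobiliaria':'Imobiliária'}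
--
-- GENERICOS=['contato','atendimento','info','comercial','suporte']
--
-- DOMINIOS_PESSOAIS=['gmail.com','hotmail.com','outlook.com']
--
-- # all known words with their output token, business words first, longest first
-- ORDER = [(w, cap) for w, cap in sorted(PALAVRAS.items(), key=lambda x: len(x[0]), reverse=True)] \
--       + [(n, n.capitalize()) for n in sorted(NOMES + SOBRENOMES, key=len, reverse=True)]
--
-- # first-character index: only words starting with base[pos] are tried at pos
-- IDX = {}
-- for _w, _tok in ORDER:
--     IDX[_w[0]] = IDX.get(_w[0], []) + [(_w, _tok)]
--
-- def _matches(base):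
--     """Phase 1: greedy left-to-right list of matched intervals (start, end, token)."""
--     out = []
--     pos = 0
--     n = len(base)
--     while pos < n:
--         hit = None
--         for w, tok in IDX.get(base[pos], []):
--             if base.startswith(w, pos):
--                 hit = (w, tok)
--                 break
--         if hit is not None:
--             out.append((pos, pos + len(hit[0]), hit[1]))
--             pos += len(hit[0])
--         else:
--             pos += 1
--     return out
--
-- def extrair_nome(email):
--     if not email or '@' not in email:
--         return "Lead sem nome"
--     prefixo, dominio = email.split('@', 1)
--     dominio_limpo = dominio.replace('.com.br', '').replace('.com', '').replace('.adv.br', '')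
--
--     if prefixo.lower() in GENERICOS:
--         base = dominio_limpo
--     elif any(d in dominio.lower() for d in DOMINIOS_PESSOAIS):
--         base = prefixo
--     else:
--         base = dominio_limpo
--     base = base.lower().strip()
--
--     # Phase 2: rebuild the output from the intervals, slicing the gaps
--     parts = []
--     prev = 0
--     for s, e, tok in _matches(base):
--         if prev < s:
--             parts.append(base[prev:s].capitalize())
--         parts.append(tok)
--         prev = e
--     if prev < len(base):
--         parts.append(base[prev:].capitalize())
--     return ' '.join(parts) if parts else base.capitalize()
-- ===== Notes on version B (the rewrite author's own statement) =====
-- stated objective: alternative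
-- what changed: A is one interleaved while-loop that re-sorts the word tables every iteration and collects unknown runs with a nested lookahead loop; B is staged: it builds a first-character index of the known words once, phase 1 produces the list of matched intervals (start, end, token), and phase 2 rebuilds the output by slicing the gap between consecutive intervals.
import Mathlib
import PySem

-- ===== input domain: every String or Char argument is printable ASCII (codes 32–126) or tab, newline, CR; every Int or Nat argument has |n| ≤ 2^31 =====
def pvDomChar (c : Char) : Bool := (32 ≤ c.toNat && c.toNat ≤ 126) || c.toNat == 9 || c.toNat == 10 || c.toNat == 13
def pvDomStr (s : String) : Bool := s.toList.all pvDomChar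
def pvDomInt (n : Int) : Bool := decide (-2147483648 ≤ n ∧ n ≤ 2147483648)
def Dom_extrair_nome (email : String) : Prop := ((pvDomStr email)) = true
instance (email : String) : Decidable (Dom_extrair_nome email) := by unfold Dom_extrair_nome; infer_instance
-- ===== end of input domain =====

set_option maxRecDepth 8192

-- B is a staged re-implementation: phase 1 builds the list of matched intervals using a
-- first-character index of the known words, phase 2 rebuilds the output by slicing the gaps;
-- A interleaves matching with a nested lookahead chunk loop (objective: alternative structure).
-- The fuel arguments of the loops only guard totality (a position bound; always sufficient).

-- ===== PORT A =====
-- module-level constants shared by both Pythons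
def pvNomes : List (List Char) :=
  ["alexandre".toList,"cristina".toList,"fernanda".toList,"fernando".toList,"julia".toList,
   "lucas".toList,"luiz".toList,"luis".toList,"marcelo".toList,"maria".toList,"paulo".toList,
   "pedro".toList,"rafael".toList,"sergio".toList,"vitor".toList,"ana".toList,"andre".toList,
   "bruno".toList,"daniel".toList,"diego".toList,"eduardo".toList,"fabio".toList,"felipe".toList,
   "livia".toList,"marly".toList]

def pvSobrenomes : List (List Char) :=
  ["silva".toList,"santos".toList,"oliveira".toList,"ferreira".toList,"alves".toList,"costa".toList,
   "gomes".toList,"lopes".toList,"soares".toList,"dias".toList,"moreira".toList,"campos".toList,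
   "miranda".toList,"farias".toList,"sales".toList,"coelho".toList,"ramos".toList,"milanez".toList,
   "lagemann".toList,"favero".toList]

-- the PALAVRAS dict in insertion order (only .items() / .keys() are used)
def pvPalavras : List (List Char × String) :=
  [("contabilidade".toList,"Contabilidade"),("advocacia".toList,"Advocacia"),
   ("advogados".toList,"Advogados"),("consultoria".toList,"Consultoria"),
   ("clinica".toList,"Clínica"),("academia".toList,"Academia"),("cabana".toList,"Cabana"),
   ("imovel".toList,"Imóvel"),("imobiliaria".toList,"Imobiliária")]

def pvGenericos : List (List Char) :=
  ["contato".toList,"atendimento".toList,"info".toList,"comercial".toList,"suporte".toList]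

def pvPessoais : List (List Char) :=
  ["gmail.com".toList,"hotmail.com".toList,"outlook.com".toList]

-- exact port of str.capitalize() on the ASCII domain (title-case = upper-case there)
def pvCapitalize (cs : List Char) : List Char :=
  match cs with
  | [] => []
  | c :: t => PySem.Chars.upperChar c :: PySem.Chars.lower t

-- A's inline test  base[pos:pos+len(pal)] == pal
def pvMatchesAt (base : List Char) (pos : Nat) (w : List Char) : Bool :=
  PySem.List.slice base (some (pos : Int)) (some ((pos : Int) + w.length)) == w

-- A's 'achou' scan:  for pal in list(PALAVRAS.keys())+NOMES+SOBRENOMES: … break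
def pvAchou (base : List Char) (pos : Nat) : Bool :=
  (pvPalavras.map (·.1) ++ pvNomes ++ pvSobrenomes).any (fun pal => pvMatchesAt base pos pal)

-- A's inner chunk-collection while-loop (fuel only guards totality)
def pvChunkA (base : List Char) : Nat → Nat → List Char → List Char × Nat
  | 0, pos, chunk => (chunk, pos)
  | fuel + 1, pos, chunk =>
    if pos < base.length then
      if pvAchou base (pos + 1) then (chunk ++ [PySem.List.pyGetD base (pos : Int) ' '], pos + 1)
      else pvChunkA base fuel (pos + 1) (chunk ++ [PySem.List.pyGetD base (pos : Int) ' '])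
    else (chunk, pos)

-- A's main while-loop ('Passar 1'); fuel only guards totality
def pvLoopA (base : List Char) : Nat → Nat → List (List Char) → List (List Char)
  | 0, _, res => res
  | fuel + 1, pos, res =>
    if pos < base.length then
      match (PySem.List.sorted pvPalavras (fun x => x.1.length) true).find?
          (fun x => pvMatchesAt base pos x.1) with
      | some pc => pvLoopA base fuel (pos + pc.1.length) (res ++ [pc.2.toList])
      | none =>
        match (PySem.List.sorted (pvNomes ++ pvSobrenomes) (fun w => w.length) true).find?
            (fun w => pvMatchesAt base pos w) with
        | some nome => pvLoopA base fuel (pos + nome.length) (res ++ [pvCapitalize nome])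
        | none =>
          pvLoopA base fuel (pvChunkA base base.length pos []).2
            (if (pvChunkA base base.length pos []).1 = [] then res
             else res ++ [pvCapitalize (pvChunkA base base.length pos []).1])
    else res

def extrair_nome (email : String) : String :=
  let emailL := email.toList
  if emailL = [] ∨ ¬ PySem.Chars.isIn ['@'] emailL then "Lead sem nome" else
  -- email.split('@', 1): '@' is present, so there are exactly two parts
  let parts := (PySem.Chars.splitMax? emailL ['@'] 1).getD []
  let prefixo := parts.getD 0 []
  let dominio := parts.getD 1 []
  let dominio_limpo := PySem.Chars.replace (PySem.Chars.replace
      (PySem.Chars.replace dominio ".com.br".toList []) ".com".toList []) ".adv.br".toList []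
  let base0 :=
    if pvGenericos.contains (PySem.Chars.lower prefixo) then dominio_limpo
    else if pvPessoais.any (fun d => PySem.Chars.isIn d (PySem.Chars.lower dominio)) then prefixo
    else dominio_limpo
  let base := PySem.Chars.strip (PySem.Chars.lower base0)
  let resultado := pvLoopA base (base.length + 1) 0 []
  if resultado = [] then String.ofList (pvCapitalize base)
  else String.ofList (PySem.Chars.join [' '] resultado)

-- ===== PORT B =====
-- ORDER: all known words with their output token, business words first, longest first
def pvOrder : List (List Char × List Char) :=
  (PySem.List.sorted pvPalavras (fun x => x.1.length) true).map (fun pc => (pc.1, pc.2.toList)) ++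
  (PySem.List.sorted (pvNomes ++ pvSobrenomes) (fun w => w.length) true).map
    (fun n => (n, pvCapitalize n))

-- IDX: first-character index of ORDER ('w[0]' is exact as headD since every word is nonempty)
def pvIdx : PySem.Dict Char (List (List Char × List Char)) :=
  pvOrder.foldl (fun d e => d.modify (e.1.headD ' ') [] (fun v => v ++ [e])) PySem.Dict.empty

-- B's inner for-loop over the bucket: first word of IDX[base[pos]] matching at pos
def pvFindB (base : List Char) (pos : Nat) : Option (List Char × List Char) :=
  (pvIdx.getD (PySem.List.pyGetD base (pos : Int) ' ') []).find?
    (fun e => PySem.Chars.startswith (base.drop pos) e.1)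

-- phase 1 (_matches): greedy list of matched intervals (start, end, token); fuel guards totality
def pvScanB (base : List Char) : Nat → Nat → List (Nat × Nat × List Char) → List (Nat × Nat × List Char)
  | 0, _, out => out
  | fuel + 1, pos, out =>
    if pos < base.length then
      match pvFindB base pos with
      | some e => pvScanB base fuel (pos + e.1.length) (out ++ [(pos, pos + e.1.length, e.2)])
      | none => pvScanB base fuel (pos + 1) out
    else out

-- phase 2: the for-loop over the intervals, slicing each gap
def pvRenderLoop (base : List Char) : List (Nat × Nat × List Char) → Nat → List (List Char) →
    List (List Char) × Nat
  | [], prev, parts => (parts, prev)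
  | (s, e, tok) :: rest, prev, parts =>
    pvRenderLoop base rest e
      ((if prev < s then
          parts ++ [pvCapitalize (PySem.List.slice base (some (prev : Int)) (some (s : Int)))]
        else parts) ++ [tok])

def extrair_nome_alt (email : String) : String :=
  let emailL := email.toList
  if emailL = [] ∨ ¬ PySem.Chars.isIn ['@'] emailL then "Lead sem nome" else
  -- email.split('@', 1): '@' is present, so there are exactly two parts
  let parts := (PySem.Chars.splitMax? emailL ['@'] 1).getD []
  let prefixo := parts.getD 0 []
  let dominio := parts.getD 1 []
  let dominio_limpo := PySem.Chars.replace (PySem.Chars.replace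
      (PySem.Chars.replace dominio ".com.br".toList []) ".com".toList []) ".adv.br".toList []
  let base0 :=
    if pvGenericos.contains (PySem.Chars.lower prefixo) then dominio_limpo
    else if pvPessoais.any (fun d => PySem.Chars.isIn d (PySem.Chars.lower dominio)) then prefixo
    else dominio_limpo
  let base := PySem.Chars.strip (PySem.Chars.lower base0)
  let ms := pvScanB base (base.length + 1) 0 []
  let pr := pvRenderLoop base ms 0 []
  let tokens :=
    if pr.2 < base.length then
      pr.1 ++ [pvCapitalize (PySem.List.slice base (some (pr.2 : Int)) none)]
    else pr.1
  if tokens = [] then String.ofList (pvCapitalize base)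
  else String.ofList (PySem.Chars.join [' '] tokens)

-- ===== PRECONDITION & SPEC =====
def Spec_extrair_nome (email : String) (out : String) : Prop := out = extrair_nome_alt email
instance (email : String) (out : String) : Decidable (Spec_extrair_nome email out) := by unfold Spec_extrair_nome; infer_instance

-- ===== CLAIM (what is proved, stated in full; the proofs are below) =====
def Claim_equal_extrair_nome : Prop := ∀ (email : String), Dom_extrair_nome email → Spec_extrair_nome email (extrair_nome email)

-- ===== LEMMAS AND PROOFS =====

-- proof-only helper: the first ORDER entry matching at pos (what A's two staged finds compute)
def pvAStep (base : List Char) (pos : Nat) : Option (List Char × List Char) :=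
  pvOrder.find? (fun e => PySem.Chars.startswith (base.drop pos) e.1)

-- proof-only helper: the tokens B produces from position pos onwards
def pvFinish (base : List Char) (pos : Nat) : List (List Char) :=
  if (pvRenderLoop base (pvScanB base (base.length + 1) pos []) pos []).2 < base.length then
    (pvRenderLoop base (pvScanB base (base.length + 1) pos []) pos []).1 ++
      [pvCapitalize (PySem.List.slice base
        (some ((pvRenderLoop base (pvScanB base (base.length + 1) pos []) pos []).2 : Int)) none)]
  else (pvRenderLoop base (pvScanB base (base.length + 1) pos []) pos []).1

lemma pvPalavras_key_pos : ∀ x ∈ pvPalavras, 0 < x.1.length := by decide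

lemma pvNomes_pos : ∀ w ∈ pvNomes ++ pvSobrenomes, 0 < w.length := by decide

-- A's slice comparison and B's startswith test agree
lemma pvMatch_eq (base : List Char) (pos : Nat) (w : List Char) :
    pvMatchesAt base pos w = PySem.Chars.startswith (base.drop pos) w := by
  have h1 : PySem.List.slice base (some (pos : Int)) (some ((pos : Int) + w.length))
      = (base.drop pos).take w.length := by
    rw [PySem.List.slice_toNat base (by omega) (by omega)]
    congr 1
    omega
  unfold pvMatchesAt
  rw [h1]
  by_cases hp : w <+: base.drop pos
  · have e1 : (base.drop pos).take w.length = w := (List.prefix_iff_eq_take.mp hp).symm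
    have e2 : PySem.Chars.startswith (base.drop pos) w = true :=
      (PySem.Chars.startswith_iff _ _).mpr hp
    simp [e1, e2]
  · have e1 : (base.drop pos).take w.length ≠ w := fun e =>
      hp (List.prefix_iff_eq_take.mpr e.symm)
    have e2 : PySem.Chars.startswith (base.drop pos) w = false := by
      rw [← Bool.not_eq_true]
      exact fun h => hp ((PySem.Chars.startswith_iff _ _).mp h)
    simp [e1, e2]

-- every ORDER entry's word is nonempty
lemma pvOrder_ne_nil : ∀ e ∈ pvOrder, e.1 ≠ [] := by
  intro e he
  have hpos : 0 < e.1.length := by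
    rcases List.mem_append.mp he with h | h
    · rcases List.mem_map.mp h with ⟨x, hx, rfl⟩
      exact pvPalavras_key_pos x
        (((PySem.List.sorted_perm pvPalavras (fun y => y.1.length) true).mem_iff).mp hx)
    · rcases List.mem_map.mp h with ⟨n, hn, rfl⟩
      exact pvNomes_pos n
        (((PySem.List.sorted_perm (pvNomes ++ pvSobrenomes) (fun w => w.length) true).mem_iff).mp hn)
  intro hn
  rw [hn] at hpos
  simp at hpos

-- find? over a filtered list when the predicate forces the filter
lemma pvFind?_filter {α : Type} (l : List α) (p q : α → Bool)
    (h : ∀ x ∈ l, p x = true → q x = true) : (l.filter q).find? p = l.find? p := by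
  induction l with
  | nil => rfl
  | cons a t ih =>
    by_cases hq : q a = true
    · rw [List.filter_cons_of_pos hq, List.find?_cons, List.find?_cons]
      cases hp : p a
      · exact ih (fun x hx => h x (List.mem_cons_of_mem a hx))
      · rfl
    · rw [List.filter_cons_of_neg (by simpa using hq), List.find?_cons]
      cases hp : p a
      · exact ih (fun x hx => h x (List.mem_cons_of_mem a hx))
      · exact absurd (h a (List.mem_cons_self) hp) hq

-- the bucket of IDX at c is the ORDER entries whose word starts with c
lemma pvIdx_getD (c : Char) :
    pvIdx.getD c [] = pvOrder.filter (fun e => e.1.headD ' ' == c) := by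
  unfold pvIdx
  have h1 : pvOrder.foldl (fun d e => d.modify (e.1.headD ' ') [] (fun v => v ++ [e]))
        PySem.Dict.empty
      = (pvOrder.map (fun e => (e.1.headD ' ', e))).foldl
          (fun d p => d.modify p.1 [] (fun v => v ++ [p.2])) PySem.Dict.empty := by
    rw [List.foldl_map]
  rw [h1, PySem.Dict.getD_foldl_modify_append, PySem.Dict.getD_empty, List.filter_map,
    List.map_map]
  simp [Function.comp_def]

-- B's bucket search at an in-range position agrees with the search over all of ORDER
lemma pvFindB_eq (base : List Char) (pos : Nat) (h : pos < base.length) :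
    pvFindB base pos = pvAStep base pos := by
  unfold pvFindB pvAStep
  rw [pvIdx_getD]
  apply pvFind?_filter
  intro e he hp
  have hne := pvOrder_ne_nil e he
  have hpre : e.1 <+: base.drop pos := (PySem.Chars.startswith_iff _ _).mp hp
  rw [List.drop_eq_getElem_cons h] at hpre
  cases h1 : e.1 with
  | nil => exact absurd h1 hne
  | cons c t =>
    rw [h1] at hpre
    have hc : c = base[pos] := by
      rcases hpre with ⟨r, hr⟩
      exact (List.cons_eq_cons.mp hr.symm).1.symm
    rw [PySem.List.pyGetD_eq_getElem base ' ' (by omega) (by exact_mod_cast h)]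
    simp [hc]

-- A's two staged finds compute pvAStep
lemma pvAStep_eq (base : List Char) (pos : Nat) :
    pvAStep base pos =
      (((PySem.List.sorted pvPalavras (fun x => x.1.length) true).find?
          (fun x => pvMatchesAt base pos x.1)).map (fun pc => (pc.1, pc.2.toList))).or
        (((PySem.List.sorted (pvNomes ++ pvSobrenomes) (fun w => w.length) true).find?
          (fun w => pvMatchesAt base pos w)).map (fun n => (n, pvCapitalize n))) := by
  have hp1 : ((fun e : List Char × List Char => PySem.Chars.startswith (base.drop pos) e.1) ∘
      (fun pc : List Char × String => (pc.1, pc.2.toList)))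
      = (fun x : List Char × String => pvMatchesAt base pos x.1) := by
    funext x
    simp [Function.comp, pvMatch_eq]
  have hp2 : ((fun e : List Char × List Char => PySem.Chars.startswith (base.drop pos) e.1) ∘
      (fun n : List Char => (n, pvCapitalize n)))
      = (fun w : List Char => pvMatchesAt base pos w) := by
    funext w
    simp [Function.comp, pvMatch_eq]
  unfold pvAStep pvOrder
  rw [List.find?_append, List.find?_map, List.find?_map, hp1, hp2]

-- A's 'achou' scan succeeds exactly where pvAStep does
lemma pvAchou_iff (base : List Char) (pos : Nat) :
    pvAchou base pos = (pvAStep base pos).isSome := by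
  rw [Bool.eq_iff_iff, pvAStep_eq, Option.isSome_or]
  unfold pvAchou
  rw [Bool.or_eq_true, Option.isSome_map, Option.isSome_map]
  constructor
  · intro h
    rcases List.any_eq_true.mp h with ⟨pal, hmem, hmatch⟩
    rcases List.mem_append.mp hmem with hmem' | hsob
    · rcases List.mem_append.mp hmem' with hpal | hnom
      · rcases List.mem_map.mp hpal with ⟨x, hx, rfl⟩
        exact Or.inl (List.find?_isSome.mpr ⟨x,
          ((PySem.List.sorted_perm pvPalavras (fun y => y.1.length) true).mem_iff).mpr hx, hmatch⟩)
      · exact Or.inr (List.find?_isSome.mpr ⟨pal,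
          ((PySem.List.sorted_perm (pvNomes ++ pvSobrenomes) (fun w => w.length) true).mem_iff).mpr
            (List.mem_append.mpr (Or.inl hnom)), hmatch⟩)
    · exact Or.inr (List.find?_isSome.mpr ⟨pal,
        ((PySem.List.sorted_perm (pvNomes ++ pvSobrenomes) (fun w => w.length) true).mem_iff).mpr
          (List.mem_append.mpr (Or.inr hsob)), hmatch⟩)
  · intro h
    rcases h with h | h
    · rcases List.find?_isSome.mp h with ⟨x, hx, hsw⟩
      refine List.any_eq_true.mpr ⟨x.1, ?_, hsw⟩
      exact List.mem_append.mpr (Or.inl (List.mem_append.mpr (Or.inl (List.mem_map.mpr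
        ⟨x, ((PySem.List.sorted_perm pvPalavras (fun y => y.1.length) true).mem_iff).mp hx, rfl⟩))))
    · rcases List.find?_isSome.mp h with ⟨x, hx, hsw⟩
      refine List.any_eq_true.mpr ⟨x, ?_, hsw⟩
      have hnm :=
        ((PySem.List.sorted_perm (pvNomes ++ pvSobrenomes) (fun w => w.length) true).mem_iff).mp hx
      rcases List.mem_append.mp hnm with h'' | h''
      · exact List.mem_append.mpr (Or.inl (List.mem_append.mpr (Or.inr h'')))
      · exact List.mem_append.mpr (Or.inr h'')

-- a successful match consumes at least one character
lemma pvAStep_pos (base : List Char) (pos : Nat) (e : List Char × List Char)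
    (h : pvAStep base pos = some e) : 0 < e.1.length := by
  have hm : e ∈ pvOrder := List.mem_of_find?_eq_some h
  have := pvOrder_ne_nil e hm
  cases h1 : e.1 with
  | nil => exact absurd h1 this
  | cons c t => simp

-- pvChunkA facts
lemma pvChunkA_of_ge (base : List Char) (fuel pos : Nat) (chunk : List Char)
    (h : ¬ pos < base.length) : pvChunkA base fuel pos chunk = (chunk, pos) := by
  cases fuel with
  | zero => rfl
  | succ fuel => rw [pvChunkA, if_neg h]

lemma pvChunkA_ge (base : List Char) :
    ∀ fuel pos chunk, pos ≤ (pvChunkA base fuel pos chunk).2 := by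
  intro fuel
  induction fuel with
  | zero => intro pos chunk; exact Nat.le_refl pos
  | succ fuel ih =>
    intro pos chunk
    rw [pvChunkA]
    by_cases hlt : pos < base.length
    · rw [if_pos hlt]
      split
      · simp
      · have := ih (pos + 1) (chunk ++ [PySem.List.pyGetD base (pos : Int) ' '])
        omega
    · rw [if_neg hlt]

lemma pvChunkA_lt (base : List Char) (fuel pos : Nat) (chunk : List Char)
    (h : pos < base.length) (hf : base.length - pos ≤ fuel) :
    pos < (pvChunkA base fuel pos chunk).2 := by
  cases fuel with
  | zero => omega
  | succ fuel =>
    rw [pvChunkA, if_pos h]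
    split
    · simp
    · have := pvChunkA_ge base fuel (pos + 1) (chunk ++ [PySem.List.pyGetD base (pos : Int) ' '])
      omega

-- the chunk loop stops at a position where A's scan succeeds, or at the end
lemma pvChunkA_stop (base : List Char) :
    ∀ fuel pos chunk, base.length - pos ≤ fuel →
      ((pvChunkA base fuel pos chunk).2 < base.length →
        pvAchou base (pvChunkA base fuel pos chunk).2 = true) := by
  intro fuel
  induction fuel with
  | zero =>
    intro pos chunk hf
    rw [pvChunkA]
    intro h
    omega
  | succ fuel ih =>
    intro pos chunk hf
    by_cases hlt : pos < base.length
    · rw [pvChunkA, if_pos hlt]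
      split
      · rename_i ha
        intro _
        exact ha
      · exact ih (pos + 1) _ (by omega)
    · rw [pvChunkA, if_neg hlt]
      intro h
      omega

-- the scan does not depend on the fuel once it exceeds the remaining length
lemma pvScanB_fuel (base : List Char) :
    ∀ f1 f2 pos out, base.length - pos < f1 → base.length - pos < f2 →
      pvScanB base f1 pos out = pvScanB base f2 pos out := by
  intro f1
  induction f1 with
  | zero => intro f2 pos out h1 h2; omega
  | succ f1 ih =>
    intro f2 pos out h1 h2
    cases f2 with
    | zero => omega
    | succ f2 =>
      rw [pvScanB, pvScanB]
      by_cases hlt : pos < base.length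
      · rw [if_pos hlt, if_pos hlt]
        cases hT : pvFindB base pos with
        | some e =>
          have hpos := pvAStep_pos base pos e (by rw [← pvFindB_eq base pos hlt]; exact hT)
          exact ih f2 (pos + e.1.length) _ (by omega) (by omega)
        | none => exact ih f2 (pos + 1) out (by omega) (by omega)
      · rw [if_neg hlt, if_neg hlt]

-- the scan's accumulator is a prefix of its output
lemma pvScanB_acc (base : List Char) :
    ∀ fuel pos out, pvScanB base fuel pos out = out ++ pvScanB base fuel pos [] := by
  intro fuel
  induction fuel with
  | zero => intro pos out; simp [pvScanB]
  | succ fuel ih =>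
    intro pos out
    by_cases hlt : pos < base.length
    · cases hT : pvFindB base pos with
      | some e =>
        rw [pvScanB, pvScanB, if_pos hlt, if_pos hlt, hT]
        dsimp only
        rw [ih (pos + e.1.length) (out ++ [(pos, pos + e.1.length, e.2)]),
          ih (pos + e.1.length) ([] ++ [(pos, pos + e.1.length, e.2)])]
        simp
      | none =>
        rw [pvScanB, pvScanB, if_pos hlt, if_pos hlt, hT]
        dsimp only
        rw [ih (pos + 1) out]
    · rw [pvScanB, pvScanB, if_neg hlt, if_neg hlt]
      simp

-- the render loop's parts accumulator is a prefix of its output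
lemma pvRenderLoop_acc (base : List Char) :
    ∀ ms prev parts, pvRenderLoop base ms prev parts =
      (parts ++ (pvRenderLoop base ms prev []).1, (pvRenderLoop base ms prev []).2) := by
  intro ms
  induction ms with
  | nil => intro prev parts; simp [pvRenderLoop]
  | cons h t ih =>
    intro prev parts
    obtain ⟨s, e, tok⟩ := h
    rw [pvRenderLoop, pvRenderLoop]
    by_cases hp : prev < s
    · rw [if_pos hp, if_pos hp,
        ih e (parts ++ [pvCapitalize (PySem.List.slice base (some (prev : Int)) (some (s : Int)))] ++ [tok]),
        ih e ([] ++ [pvCapitalize (PySem.List.slice base (some (prev : Int)) (some (s : Int)))] ++ [tok])]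
      simp
    · rw [if_neg hp, if_neg hp, ih e (parts ++ [tok]), ih e ([] ++ [tok])]
      simp

-- scan step at a matched position
lemma pvScanB_some (base : List Char) (pos : Nat) (e : List Char × List Char)
    (hlt : pos < base.length) (hT : pvFindB base pos = some e) :
    pvScanB base (base.length + 1) pos [] =
      (pos, pos + e.1.length, e.2) :: pvScanB base (base.length + 1) (pos + e.1.length) [] := by
  have hpos := pvAStep_pos base pos e (by rw [← pvFindB_eq base pos hlt]; exact hT)
  rw [pvScanB, if_pos hlt, hT]
  dsimp only
  rw [pvScanB_acc base base.length (pos + e.1.length),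
    pvScanB_fuel base base.length (base.length + 1) (pos + e.1.length) [] (by omega) (by omega)]
  simp

-- scan step at an unmatched position
lemma pvScanB_none (base : List Char) (pos : Nat)
    (hlt : pos < base.length) (hT : pvFindB base pos = none) :
    pvScanB base (base.length + 1) pos [] = pvScanB base (base.length + 1) (pos + 1) [] := by
  rw [pvScanB, if_pos hlt, hT,
    pvScanB_fuel base base.length (base.length + 1) (pos + 1) [] (by omega) (by omega)]

-- scan at or past the end is empty
lemma pvScanB_end (base : List Char) (pos : Nat) (h : ¬ pos < base.length) :
    pvScanB base (base.length + 1) pos [] = [] := by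
  rw [pvScanB, if_neg h]

-- the chunk loop: contents, bound, and the scan skipping over it
lemma pvChunkA_props (base : List Char) :
    ∀ fuel pos c0, pos < base.length → base.length - pos ≤ fuel →
      (pvChunkA base fuel pos c0).1 =
          c0 ++ (base.drop pos).take ((pvChunkA base fuel pos c0).2 - pos) ∧
      (pvChunkA base fuel pos c0).2 ≤ base.length ∧
      pvScanB base (base.length + 1) (pos + 1) [] =
        pvScanB base (base.length + 1) (pvChunkA base fuel pos c0).2 [] := by
  intro fuel
  induction fuel with
  | zero => intro pos c0 h hf; omega
  | succ fuel ih =>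
    intro pos c0 h hf
    have hch : PySem.List.pyGetD base (pos : Int) ' ' = base[pos] :=
      PySem.List.pyGetD_eq_getElem base ' ' (by omega) (by exact_mod_cast h)
    have htake1 : (base.drop pos).take 1 = [base[pos]] := by
      rw [List.drop_eq_getElem_cons h]
      rfl
    rw [pvChunkA, if_pos h, hch]
    by_cases ha : pvAchou base (pos + 1) = true
    · rw [if_pos ha]
      refine ⟨?_, by omega, rfl⟩
      simp [htake1]
    · rw [if_neg ha]
      by_cases hlt' : pos + 1 < base.length
      · obtain ⟨h1, h2, h3⟩ := ih (pos + 1) (c0 ++ [base[pos]]) hlt' (by omega)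
        have hstop := pvChunkA_ge base fuel (pos + 1) (c0 ++ [base[pos]])
        refine ⟨?_, h2, ?_⟩
        · rw [h1, List.append_assoc]
          congr 1
          have hsucc : (pvChunkA base fuel (pos + 1) (c0 ++ [base[pos]])).2 - pos
              = ((pvChunkA base fuel (pos + 1) (c0 ++ [base[pos]])).2 - (pos + 1)) + 1 := by
            omega
          rw [List.drop_eq_getElem_cons h, hsucc, List.take_succ_cons]
          rfl
        · have hfb : pvFindB base (pos + 1) = none := by
            rw [pvFindB_eq base (pos + 1) hlt']
            have hiff := pvAchou_iff base (pos + 1)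
            rw [Bool.not_eq_true] at ha
            rw [ha] at hiff
            exact Option.not_isSome_iff_eq_none.mp (by rw [← hiff]; simp)
          rw [pvScanB_none base (pos + 1) hlt' hfb]
          exact h3
      · rw [pvChunkA_of_ge base fuel (pos + 1) _ hlt']
        refine ⟨?_, by omega, rfl⟩
        simp [htake1]

-- slice bridges
lemma pvSlice_nat (base : List Char) (a b : Nat) :
    PySem.List.slice base (some (a : Int)) (some (b : Int)) = (base.drop a).take (b - a) := by
  rw [PySem.List.slice_toNat base (by omega) (by omega)]
  simp

-- pvFinish unfolds over the head of the scan
lemma pvFinish_match (base : List Char) (pos : Nat) (e : List Char × List Char)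
    (hlt : pos < base.length) (hT : pvFindB base pos = some e) :
    pvFinish base pos = e.2 :: pvFinish base (pos + e.1.length) := by
  unfold pvFinish
  rw [pvScanB_some base pos e hlt hT]
  simp only [pvRenderLoop]
  rw [if_neg (Nat.lt_irrefl pos)]
  rw [pvRenderLoop_acc base (pvScanB base (base.length + 1) (pos + e.1.length) [])
    (pos + e.1.length) ([] ++ [e.2])]
  simp only [List.nil_append]
  by_cases h2 : (pvRenderLoop base (pvScanB base (base.length + 1) (pos + e.1.length) [])
      (pos + e.1.length) []).2 < base.length
  · rw [if_pos h2, if_pos h2]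
    simp
  · rw [if_neg h2, if_neg h2]
    simp

-- pvFinish absorbs a gap ending at stop (where the scan continues)
lemma pvFinish_gap (base : List Char) (pos stop : Nat) (hps : pos < stop) (hsn : stop ≤ base.length)
    (hscan : pvScanB base (base.length + 1) pos [] = pvScanB base (base.length + 1) stop [])
    (hstop : stop < base.length → (pvFindB base stop).isSome) :
    pvFinish base pos =
      pvCapitalize ((base.drop pos).take (stop - pos)) :: pvFinish base stop := by
  by_cases hsl : stop < base.length
  · rcases Option.isSome_iff_exists.mp (hstop hsl) with ⟨e, hT⟩
    have hs := pvScanB_some base stop e hsl hT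
    unfold pvFinish
    rw [hscan, hs]
    simp only [pvRenderLoop]
    rw [if_pos hps, if_neg (Nat.lt_irrefl stop)]
    rw [pvRenderLoop_acc base (pvScanB base (base.length + 1) (stop + e.1.length) [])
        (stop + e.1.length)
        ([] ++ [pvCapitalize (PySem.List.slice base (some (pos : Int)) (some (stop : Int)))] ++ [e.2]),
      pvRenderLoop_acc base (pvScanB base (base.length + 1) (stop + e.1.length) [])
        (stop + e.1.length) ([] ++ [e.2]), pvSlice_nat]
    simp only [List.nil_append]
    by_cases h2 : (pvRenderLoop base (pvScanB base (base.length + 1) (stop + e.1.length) [])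
        (stop + e.1.length) []).2 < base.length
    · rw [if_pos h2, if_pos h2]
      simp
    · rw [if_neg h2, if_neg h2]
      simp
  · have hsn' : stop = base.length := by omega
    subst hsn'
    unfold pvFinish
    rw [hscan, pvScanB_end base base.length (by omega)]
    simp only [pvRenderLoop]
    rw [if_pos hps, if_neg (by omega : ¬ base.length < base.length)]
    have hs1 : PySem.List.slice base (some (pos : Int)) none = base.drop pos := by
      rw [PySem.List.slice_from base (by omega)]
      simp
    have hs2 : (base.drop pos).take (base.length - pos) = base.drop pos := by
      apply List.take_of_length_le
      simp
    rw [hs1, hs2]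
    simp

-- pvFinish at or past the end is empty
lemma pvFinish_end (base : List Char) (pos : Nat) (h : ¬ pos < base.length) :
    pvFinish base pos = [] := by
  unfold pvFinish
  rw [pvScanB_end base pos h]
  simp only [pvRenderLoop]
  rw [if_neg h]

-- MAIN: A's loop produces exactly B's staged tokens
lemma pvLoopA_finish (base : List Char) :
    ∀ fuel pos res, base.length - pos < fuel →
      pvLoopA base fuel pos res = res ++ pvFinish base pos := by
  intro fuel
  induction fuel with
  | zero => intro pos res h; omega
  | succ fuel ih =>
    intro pos res hf
    by_cases hlt : pos < base.length
    · rw [pvLoopA, if_pos hlt]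
      split
      · rename_i pc h1
        have hA : pvAStep base pos = some (pc.1, pc.2.toList) := by
          rw [pvAStep_eq, h1]
          rfl
        have hB : pvFindB base pos = some (pc.1, pc.2.toList) := by
          rw [pvFindB_eq base pos hlt]; exact hA
        have hl : 0 < pc.1.length := pvAStep_pos base pos _ hA
        rw [pvFinish_match base pos _ hlt hB]
        rw [ih (pos + pc.1.length) (res ++ [pc.2.toList]) (by omega)]
        simp
      · rename_i h1
        split
        · rename_i nome h2
          have hA : pvAStep base pos = some (nome, pvCapitalize nome) := by
            rw [pvAStep_eq, h1, h2]
            rfl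
          have hB : pvFindB base pos = some (nome, pvCapitalize nome) := by
            rw [pvFindB_eq base pos hlt]; exact hA
          have hl : 0 < nome.length := pvAStep_pos base pos _ hA
          rw [pvFinish_match base pos _ hlt hB]
          rw [ih (pos + nome.length) (res ++ [pvCapitalize nome]) (by omega)]
          simp
        · rename_i h2
          have hA : pvAStep base pos = none := by
            rw [pvAStep_eq, h1, h2]
            rfl
          have hB : pvFindB base pos = none := by
            rw [pvFindB_eq base pos hlt]; exact hA
          obtain ⟨hc1, hc2, hc3⟩ := pvChunkA_props base base.length pos [] hlt (by omega)
          have hstop := pvChunkA_lt base base.length pos [] hlt (by omega)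
          set stop := (pvChunkA base base.length pos []).2 with hstopdef
          have hscan : pvScanB base (base.length + 1) pos [] =
              pvScanB base (base.length + 1) stop [] := by
            rw [pvScanB_none base pos hlt hB]
            exact hc3
          have hmatch : stop < base.length → (pvFindB base stop).isSome := by
            intro h
            rw [pvFindB_eq base stop h, ← pvAchou_iff]
            exact pvChunkA_stop base base.length pos [] (by omega) h
          have hgap := pvFinish_gap base pos stop hstop hc2 hscan hmatch
          have hne : (pvChunkA base base.length pos []).1 ≠ [] := by
            rw [hc1]
            simp only [List.nil_append, ne_eq]
            intro hx
            have hlen := congrArg List.length hx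
            simp at hlen
            omega
          rw [if_neg hne, ih stop (res ++ [pvCapitalize (pvChunkA base base.length pos []).1])
            (by omega), hgap, hc1]
          simp
    · rw [pvLoopA, if_neg hlt, pvFinish_end base pos hlt]
      simp

-- the two token lists agree
lemma pvTokens_eq (base : List Char) :
    pvLoopA base (base.length + 1) 0 [] =
      (if (pvRenderLoop base (pvScanB base (base.length + 1) 0 []) 0 []).2 < base.length then
        (pvRenderLoop base (pvScanB base (base.length + 1) 0 []) 0 []).1 ++
          [pvCapitalize (PySem.List.slice base
            (some (((pvRenderLoop base (pvScanB base (base.length + 1) 0 []) 0 []).2 : Nat) : Int)) none)]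
      else (pvRenderLoop base (pvScanB base (base.length + 1) 0 []) 0 []).1) := by
  have h := pvLoopA_finish base (base.length + 1) 0 [] (by omega)
  rw [h]
  unfold pvFinish
  simp

-- ===== VERDICT (by name: the statement is the Claim_ definition above) =====
theorem extrair_nome_spec : Claim_equal_extrair_nome := by
  intro email _
  unfold Spec_extrair_nome
  simp only [extrair_nome, extrair_nome_alt]
  split
  · rfl
  · rw [pvTokens_eq]
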